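-- pv_equiv track=rewrite | github.com/JithendraKotla/leetcode | 2698-find-the-array-concatenation-value/2698-find-the-array-concatenation-value.py | findTheArrayConcVal
-- ===== SOURCE A (Python) =====
-- from typing import List
--
-- def findTheArrayConcVal(nums: List[int]) -> int:
--     l=0
--     r=len(nums)-1
--     concat=0
--     while l<r:
--         sum=int(str(nums[l])+str(nums[r]))
--         concat+=sum
--         l+=1
--         r-=1
--     if l==r:
--         concat+=nums[l]
--     return concat
-- ===== SOURCE B (Python) =====
-- def findTheArrayConcVal(nums):
--     total = 0
--     while len(nums) > 1:
--         total += int(str(nums[0]) + str(nums[-1]))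
--         nums = nums[1:-1]
--     return total + (nums[0] if nums else 0)
-- ===== Notes on version B (the rewrite author's own statement) =====
-- stated objective: simpler
-- what changed: Replaces A's two-pointer index arithmetic (l/r cursors plus an l==r middle fix-up) by repeatedly pairing the first and last elements and shrinking the list itself via nums[1:-1], reading the middle element off the remaining list at the end.
import Mathlib
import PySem

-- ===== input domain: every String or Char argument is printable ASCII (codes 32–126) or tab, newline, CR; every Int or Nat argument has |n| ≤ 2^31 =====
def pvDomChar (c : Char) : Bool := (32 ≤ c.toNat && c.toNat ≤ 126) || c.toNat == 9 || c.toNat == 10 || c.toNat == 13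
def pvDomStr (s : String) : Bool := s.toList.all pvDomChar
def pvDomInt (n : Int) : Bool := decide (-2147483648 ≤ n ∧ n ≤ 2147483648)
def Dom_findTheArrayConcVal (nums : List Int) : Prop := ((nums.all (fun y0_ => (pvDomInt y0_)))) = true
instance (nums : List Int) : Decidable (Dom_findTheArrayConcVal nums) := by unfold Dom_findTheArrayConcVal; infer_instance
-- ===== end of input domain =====

-- B replaces A's two-pointer index loop by a structural recursion on the list
-- (pair first/last, recurse on the inner slice); objective: simpler.

-- ===== PORT A =====
-- int(str(a)+str(b)), as both Pythons write it; .getD 0 is never reached inside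
-- Pre_ (there PySem.Int.ofStr? returns some; outside Pre_ the Pythons raise ValueError).
def pvConcat (a b : Int) : Int :=
  (PySem.Int.ofStr? (PySem.Int.toStr a ++ PySem.Int.toStr b)).getD 0

-- the while-loop of A; indices are Ints as in Python; nums[l], nums[r] are in
-- range whenever the loop body runs, so pyGet? is some and .getD 0 exact there
def findTheArrayConcValLoop (nums : List Int) (l r concat : Int) : Int × Int × Int :=
  if l < r then
    findTheArrayConcValLoop nums (l + 1) (r - 1)
      (concat + pvConcat ((PySem.List.pyGet? nums l).getD 0) ((PySem.List.pyGet? nums r).getD 0))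
  else (l, r, concat)
termination_by (r - l).toNat
decreasing_by omega

def findTheArrayConcVal (nums : List Int) : Int :=
  let s := findTheArrayConcValLoop nums 0 ((nums.length : Int) - 1) 0
  if s.1 = s.2.1 then s.2.2 + (PySem.List.pyGet? nums s.1).getD 0 else s.2.2

-- ===== PORT B =====
-- the while-loop of B: state is (total, nums); nums[0], nums[-1], nums[1:-1] are
-- evaluated only when len(nums) > 1, where they equal head, getLast and
-- (drop 1).dropLast exactly
def findTheArrayConcValAltLoop (total : Int) (nums : List Int) : Int × List Int :=
  if 1 < nums.length then
    findTheArrayConcValAltLoop (total + pvConcat (nums.headD 0) (nums.getLastD 0))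
      ((nums.drop 1).dropLast)
  else (total, nums)
termination_by nums.length
decreasing_by simp; omega

def findTheArrayConcVal_alt (nums : List Int) : Int :=
  let s := findTheArrayConcValAltLoop 0 nums
  s.1 + (match s.2 with | [] => 0 | x :: _ => x)

-- ===== PRECONDITION & SPEC =====
-- Pre_ excludes exactly the inputs on which Python A raises ValueError: those where some
-- element of the right half (a right partner of a loop pair) is negative, making
-- int(str(a)+str(b)) parse e.g. "3-5"; Python B raises ValueError on exactly the same inputs.
def Pre_findTheArrayConcVal (nums : List Int) : Prop :=
  ∀ x ∈ nums.drop ((nums.length + 1) / 2), 0 ≤ x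
instance (nums : List Int) : Decidable (Pre_findTheArrayConcVal nums) := by
  unfold Pre_findTheArrayConcVal; infer_instance

def pvWitness_findTheArrayConcVal : List Int := [7, -3, 2, 11, 5]

def Spec_findTheArrayConcVal (nums : List Int) (out : Int) : Prop := out = findTheArrayConcVal_alt nums
instance (nums : List Int) (out : Int) : Decidable (Spec_findTheArrayConcVal nums out) := by
  unfold Spec_findTheArrayConcVal; infer_instance

-- ===== CLAIM (what is proved, stated in full; the proofs are below) =====
def Claim_equal_findTheArrayConcVal : Prop := ∀ (nums : List Int), Dom_findTheArrayConcVal nums → Pre_findTheArrayConcVal nums → Spec_findTheArrayConcVal nums (findTheArrayConcVal nums)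

-- ===== LEMMAS AND PROOFS =====

-- proof-level helper: the outer-pair recurrence both programs compute
def pvConcRec : List Int → Int
  | [] => 0
  | [x] => x
  | x :: y :: rest =>
      pvConcat x ((y :: rest).getLastD 0) + pvConcRec ((y :: rest).dropLast)
termination_by nums => nums.length
decreasing_by simp

lemma alt_cons_concat (mid : List Int) (x y : Int) :
    pvConcRec (x :: (mid ++ [y])) = pvConcat x y + pvConcRec mid := by
  cases mid with
  | nil => simp [pvConcRec]
  | cons m ms =>
      show pvConcRec (x :: m :: (ms ++ [y])) = _
      rw [pvConcRec]
      have h1 : (m :: (ms ++ [y])).getLastD 0 = y := by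
        rw [List.getLastD_eq_getLast?, show m :: (ms ++ [y]) = (m :: ms) ++ [y] from rfl,
          List.getLast?_concat]
        rfl
      have h2 : (m :: (ms ++ [y])).dropLast = m :: ms := by
        simpa using List.dropLast_concat (l₁ := m :: ms) (b := y)
      rw [h1, h2]

lemma pyGetD_of_range (nums : List Int) (i : Int) (h0 : 0 ≤ i) (h : i.toNat < nums.length) :
    (PySem.List.pyGet? nums i).getD 0 = nums[i.toNat] := by
  obtain ⟨n, rfl⟩ : ∃ n : Nat, i = (n : Int) := ⟨i.toNat, by omega⟩
  rw [PySem.List.pyGet?_natCast, List.getElem?_eq_getElem (show n < nums.length by omega)]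
  simp

-- the terminal state of the loop (l ≥ r), followed by A's middle-element fix-up,
-- equals B's recursion on the (empty or singleton) remaining window
lemma loop_term (nums : List Int) (l r c : Int) (hl : 0 ≤ l) (hr : r < (nums.length : Int))
    (hlr : ¬ l < r) :
    (if l = r then c + (PySem.List.pyGet? nums l).getD 0 else c)
      = c + pvConcRec ((nums.take (r + 1).toNat).drop l.toNat) := by
  by_cases heq : l = r
  · subst heq
    have hlen : l.toNat < nums.length := by omega
    have hwin : (nums.take (l + 1).toNat).drop l.toNat = [nums[l.toNat]] := by
      have h1 : (l + 1).toNat = l.toNat + 1 := by omega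
      rw [h1, List.take_add_one, List.getElem?_eq_getElem hlen,
        List.drop_append_of_le_length (by simp; omega)]
      simp [List.drop_eq_nil_of_le]
    rw [hwin, if_pos rfl, pyGetD_of_range nums l hl hlen]
    simp [pvConcRec]
  · have hgt : r < l := by omega
    have hwin : (nums.take (r + 1).toNat).drop l.toNat = [] := by
      apply List.drop_eq_nil_of_le
      have := List.length_take_le (r + 1).toNat nums
      omega
    rw [hwin, if_neg heq]
    simp [pvConcRec]

-- the loop followed by A's middle-element fix-up computes B's recursion on the
-- window of nums between indices l and r inclusive
lemma loop_window (k : Nat) :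
    ∀ (nums : List Int) (l r c : Int), (r - l).toNat ≤ k → 0 ≤ l → r < (nums.length : Int) →
    (let s := findTheArrayConcValLoop nums l r c;
     if s.1 = s.2.1 then s.2.2 + (PySem.List.pyGet? nums s.1).getD 0 else s.2.2)
      = c + pvConcRec ((nums.take (r + 1).toNat).drop l.toNat) := by
  induction k with
  | zero =>
      intro nums l r c hk hl hr
      rw [findTheArrayConcValLoop]
      have hlr : ¬ l < r := by omega
      simp only [hlr, if_false]
      exact loop_term nums l r c hl hr hlr
  | succ k ih =>
      intro nums l r c hk hl hr
      rw [findTheArrayConcValLoop]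
      by_cases hlr : l < r
      · simp only [hlr, if_true]
        have hrec := ih nums (l + 1) (r - 1)
          (c + pvConcat ((PySem.List.pyGet? nums l).getD 0) ((PySem.List.pyGet? nums r).getD 0))
          (by omega) (by omega) (by omega)
        rw [hrec]
        have ha : l.toNat < nums.length := by omega
        have hb : r.toNat < nums.length := by omega
        have hwin : (nums.take (r + 1).toNat).drop l.toNat
            = nums[l.toNat] :: (((nums.take (r - 1 + 1).toNat).drop (l + 1).toNat) ++ [nums[r.toNat]]) := by
          have h1 : (r + 1).toNat = r.toNat + 1 := by omega
          have h2 : (r - 1 + 1).toNat = r.toNat := by omega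
          have h3 : (l + 1).toNat = l.toNat + 1 := by omega
          rw [h1, h2, h3, List.take_add_one, List.getElem?_eq_getElem hb]
          have hlen_take : l.toNat ≤ (nums.take r.toNat).length := by simp; omega
          rw [List.drop_append_of_le_length hlen_take]
          have hcons : (nums.take r.toNat).drop l.toNat
              = (nums.take r.toNat)[l.toNat]'(by simp; omega) :: (nums.take r.toNat).drop (l.toNat + 1) := by
            apply List.drop_eq_getElem_cons
          rw [hcons]
          simp [List.getElem_take]
        rw [hwin, alt_cons_concat, pyGetD_of_range nums l hl ha,
          pyGetD_of_range nums r (by omega) hb]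
        ring
      · simp only [hlr, if_false]
        exact loop_term nums l r c hl hr (by omega)

-- B's loop computes the same outer-pair recurrence
lemma altLoop_spec (k : Nat) :
    ∀ (nums : List Int) (total : Int), nums.length ≤ k →
    (let s := findTheArrayConcValAltLoop total nums;
     s.1 + (match s.2 with | [] => 0 | x :: _ => x)) = total + pvConcRec nums := by
  induction k with
  | zero =>
      intro nums total hk
      rw [findTheArrayConcValAltLoop]
      match nums, hk with
      | [], _ => simp [pvConcRec]
  | succ k ih =>
      intro nums total hk
      rw [findTheArrayConcValAltLoop]
      match nums with
      | [] => simp [pvConcRec]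
      | [x] => simp [pvConcRec]
      | x :: y :: rest =>
          have hlen : 1 < (x :: y :: rest).length := by simp
          simp only [hlen, if_true]
          have hstep := ih ((y :: rest).dropLast)
            (total + pvConcat ((x :: y :: rest).headD 0) ((x :: y :: rest).getLastD 0))
            (by simp at hk ⊢; omega)
          simp only at hstep ⊢
          rw [show ((x :: y :: rest).drop 1).dropLast = (y :: rest).dropLast from rfl, hstep,
            pvConcRec]
          simp
          ring

lemma alt_eq_rec (nums : List Int) : findTheArrayConcVal_alt nums = pvConcRec nums := by
  unfold findTheArrayConcVal_alt
  have h := altLoop_spec nums.length nums 0 (le_refl _)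
  simp only at h
  rw [h]
  ring

-- ===== VERDICT (by name: the statement is the Claim_ definition above) =====
theorem findTheArrayConcVal_spec : Claim_equal_findTheArrayConcVal := by
  intro nums _ _
  unfold Spec_findTheArrayConcVal findTheArrayConcVal
  rw [alt_eq_rec]
  have h := loop_window ((nums.length : Int) - 1 - 0).toNat nums 0 ((nums.length : Int) - 1) 0
    (le_refl _) (by omega) (by omega)
  simp only at h
  rw [h]
  have hlen : ((nums.length : Int) - 1 + 1).toNat = nums.length := by omega
  simp
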